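-- pv_equiv track=rewrite | github.com/SteeeveP/MScSeThesis | ontology/src/scripts/md_to_json.py | get_term_combinations
-- ===== SOURCE A (Python) =====
-- from typing import Dict, Iterable, List, Set, Tuple
--
-- def get_term_combinations(
--     inp: List[Dict[str, str]],
--     out: List[Dict[str, str]],
--     fill_dict: Dict[Tuple[str, str], Iterable[str]],
--     remaining_keys: List[Tuple[str, str]],
--     curr_comb: Dict[Tuple[str, str], str],
-- ) -> List[Tuple[List[Dict[str, str]], List[Dict[str, str]]]]:
--     """Another recursive function to return all combinations of fill values.
--
--     Args:
--         inp (List[Dict[str, str]]): input params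
--         out (List[Dict[str, str]]): output params
--         fill_dict (Dict[Tuple[str, str], Iterable[str]]): fill value dictionary
--         remaining_keys (List[Tuple[str, str]]): not yet assigned keys
--         curr_comb (Dict[Tuple[str, str], str]): current assignment
--
--     Returns:
--         List[Tuple[List[Dict[str, str]], List[Dict[str, str]]]]: List of all assignments
--
--     """
--     if remaining_keys:
--         modes = []
--         for val in fill_dict[remaining_keys[0]]:
--             modes += get_term_combinations(
--                 inp, out,
--                 fill_dict, remaining_keys[1:],
--                 curr_comb.copy() | {remaining_keys[0]: val},
--             )
--         return modes
--     inp_ = []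
--     for param in inp:
--         new_param = {}
--         for dim, type in param.items():
--             try:
--                 new_param[dim] = curr_comb[(dim, type)]
--             except KeyError:
--                 new_param[dim] = type
--         inp_.append(new_param)
--     out_ = []
--     for param in out:
--         new_param = {}
--         for dim, type in param.items():
--             try:
--                 new_param[dim] = curr_comb[(dim, type)]
--             except KeyError:
--                 new_param[dim] = type
--         out_.append(new_param)
--     return [(inp_, out_)]
-- ===== SOURCE B (Python) =====
-- from typing import Dict, Iterable, List, Tuple
--
-- def get_term_combinations(
--     inp: List[Dict[str, str]],
--     out: List[Dict[str, str]],
--     fill_dict: Dict[Tuple[str, str], Iterable[str]],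
--     remaining_keys: List[Tuple[str, str]],
--     curr_comb: Dict[Tuple[str, str], str],
-- ) -> List[Tuple[List[Dict[str, str]], List[Dict[str, str]]]]:
--     """Iterative version: expand the set of partial assignments key by key
--     (level-by-level) instead of depth-first recursion."""
--     combs = [dict(curr_comb)]
--     for key in remaining_keys:
--         if not combs:
--             break  # nothing left to extend
--         vals = list(fill_dict[key])
--         combs = [{**c, key: v} for c in combs for v in vals]
--
--     def substitute(params, comb):
--         return [{dim: comb.get((dim, t), t) for dim, t in param.items()}
--                 for param in params]
--
--     return [(substitute(inp, c), substitute(out, c)) for c in combs]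
-- ===== Notes on version B (the rewrite author's own statement) =====
-- stated objective: alternative
-- what changed: Replaces A's depth-first recursion (one recursive call and dict copy per assigned key, building one full assignment at a time) by an iterative level-by-level loop that maintains the list of all partial assignments and extends it key by key, then substitutes once per complete assignment.
import Mathlib
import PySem

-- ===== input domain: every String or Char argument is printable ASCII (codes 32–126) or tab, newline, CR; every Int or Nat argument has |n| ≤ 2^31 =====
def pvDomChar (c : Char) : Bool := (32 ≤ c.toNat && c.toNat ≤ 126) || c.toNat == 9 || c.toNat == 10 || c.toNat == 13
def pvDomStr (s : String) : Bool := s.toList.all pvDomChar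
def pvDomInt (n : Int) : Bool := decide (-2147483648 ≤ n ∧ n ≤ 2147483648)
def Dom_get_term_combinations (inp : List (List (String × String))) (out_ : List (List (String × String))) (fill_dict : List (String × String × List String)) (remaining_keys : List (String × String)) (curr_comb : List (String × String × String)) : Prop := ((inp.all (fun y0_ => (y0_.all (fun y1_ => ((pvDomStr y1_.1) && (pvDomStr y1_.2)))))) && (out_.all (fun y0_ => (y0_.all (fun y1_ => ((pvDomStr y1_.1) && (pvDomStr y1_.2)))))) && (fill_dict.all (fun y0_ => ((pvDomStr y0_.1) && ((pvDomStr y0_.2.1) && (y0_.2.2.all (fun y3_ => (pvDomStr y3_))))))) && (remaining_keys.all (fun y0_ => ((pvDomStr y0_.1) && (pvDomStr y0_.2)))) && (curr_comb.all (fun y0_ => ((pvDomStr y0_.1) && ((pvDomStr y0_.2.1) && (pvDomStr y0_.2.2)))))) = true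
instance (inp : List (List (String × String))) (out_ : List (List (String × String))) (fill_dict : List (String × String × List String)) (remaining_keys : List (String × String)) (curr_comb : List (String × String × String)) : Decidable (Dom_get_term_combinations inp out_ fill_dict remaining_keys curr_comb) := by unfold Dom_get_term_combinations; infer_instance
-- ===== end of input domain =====

-- B replaces A's depth-first recursion over remaining_keys by an iterative level-by-level
-- expansion of the list of partial assignments; same results, same cost (alternative).


-- marshalling (shared by both ports): the Python callers pass dicts; the assoc-list arguments
-- are turned into PySem.Dicts exactly as Python dict construction would (last value wins, first position).
def pvFillDict (fill_dict : List (String × String × List String)) : PySem.Dict (String × String) (List String) :=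
  PySem.Dict.ofList (fill_dict.map (fun p => ((p.1, p.2.1), p.2.2)))

def pvCombDict (curr_comb : List (String × String × String)) : PySem.Dict (String × String) String :=
  PySem.Dict.ofList (curr_comb.map (fun p => ((p.1, p.2.1), p.2.2)))

-- ===== PORT A =====
-- the two identical substitution loops of A: new_param = {}; for dim, type in param.items():
--   try new_param[dim] = curr_comb[(dim, type)] except KeyError: new_param[dim] = type
def pvSubstA (curr : PySem.Dict (String × String) String) (params : List (List (String × String))) :
    List (List (String × String)) :=
  params.map (fun param =>
    ((PySem.Dict.ofList param).items.foldl
      (fun (np : PySem.Dict String String) dt =>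
        np.insert dt.1 (match curr.get? (dt.1, dt.2) with | some v => v | none => dt.2))
      PySem.Dict.empty).items)

-- A's recursion; fill_dict[remaining_keys[0]] raises on a missing key in Python (outside Pre_),
-- the port takes [] there (the foldl then does nothing, like A after an empty fill list)
def pvGtcA (inp out_ : List (List (String × String)))
    (fd : PySem.Dict (String × String) (List String)) :
    List (String × String) → PySem.Dict (String × String) String →
    List ((List (List (String × String))) × (List (List (String × String))))
  | [], curr => [(pvSubstA curr inp, pvSubstA curr out_)]
  | k :: rest, curr =>
      (fd.getD k []).foldl
        (fun modes v => modes ++ pvGtcA inp out_ fd rest (curr.insert k v)) []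

def get_term_combinations (inp : List (List (String × String))) (out_ : List (List (String × String))) (fill_dict : List (String × String × List String)) (remaining_keys : List (String × String)) (curr_comb : List (String × String × String)) : List ((List (List (String × String))) × (List (List (String × String)))) :=
  pvGtcA inp out_ (pvFillDict fill_dict) remaining_keys (pvCombDict curr_comb)

-- ===== PORT B =====
-- B's loop: combs = [dict(curr_comb)]; for key in remaining_keys: if not combs: break;
--   combs = [{**c, key: v} for c in combs for v in vals]   (fill_dict[key] raises outside Pre_, [] here)
def pvLevel (fd : PySem.Dict (String × String) (List String)) :
    List (String × String) → List (PySem.Dict (String × String) String) →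
    List (PySem.Dict (String × String) String)
  | [], combs => combs
  | k :: rest, combs =>
      if combs.isEmpty then combs
      else pvLevel fd rest (combs.flatMap (fun c => (fd.getD k []).map (fun v => c.insert k v)))

-- B's substitution: a dict comprehension over param.items(), ported as a map (items keys are unique)
def pvSubstB (comb : PySem.Dict (String × String) String) (params : List (List (String × String))) :
    List (List (String × String)) :=
  params.map (fun param =>
    (PySem.Dict.ofList param).items.map (fun dt => (dt.1, comb.getD (dt.1, dt.2) dt.2)))

def get_term_combinations_alt (inp : List (List (String × String))) (out_ : List (List (String × String))) (fill_dict : List (String × String × List String)) (remaining_keys : List (String × String)) (curr_comb : List (String × String × String)) : List ((List (List (String × String))) × (List (List (String × String)))) :=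
  (pvLevel (pvFillDict fill_dict) remaining_keys [pvCombDict curr_comb]).map
    (fun c => (pvSubstB c inp, pvSubstB c out_))

-- ===== PRECONDITION & SPEC =====
-- Pre_ excludes exactly the inputs where A (and B) raise KeyError: scanning remaining_keys left to
-- right past keys whose fill list is present and nonempty, the first remaining key whose fill list
-- is empty-or-missing is actually MISSING from fill_dict (missing keys after an empty fill list are
-- never looked up: both programs return there, and the ports match them).
def Pre_get_term_combinations (inp : List (List (String × String))) (out_ : List (List (String × String))) (fill_dict : List (String × String × List String)) (remaining_keys : List (String × String)) (curr_comb : List (String × String × String)) : Prop :=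
  ((remaining_keys.dropWhile (fun k => !((pvFillDict fill_dict).getD k []).isEmpty)).head?.all
    (fun k => ((pvFillDict fill_dict).get? k).isSome)) = true
instance (inp : List (List (String × String))) (out_ : List (List (String × String))) (fill_dict : List (String × String × List String)) (remaining_keys : List (String × String)) (curr_comb : List (String × String × String)) : Decidable (Pre_get_term_combinations inp out_ fill_dict remaining_keys curr_comb) := by unfold Pre_get_term_combinations; infer_instance

def pvWitness_get_term_combinations : (List (List (String × String))) × (List (List (String × String))) × (List (String × String × List String)) × (List (String × String)) × (List (String × String × String)) :=
  ([[("rows", "N")]], [[("cols", "N")], []], [("rows", "N", ["2", "3"])], [("rows", "N")], [("cols", "N", "5")])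

def Spec_get_term_combinations (inp : List (List (String × String))) (out_ : List (List (String × String))) (fill_dict : List (String × String × List String)) (remaining_keys : List (String × String)) (curr_comb : List (String × String × String)) (out : List ((List (List (String × String))) × (List (List (String × String))))) : Prop := out = get_term_combinations_alt inp out_ fill_dict remaining_keys curr_comb
instance (inp : List (List (String × String))) (out_ : List (List (String × String))) (fill_dict : List (String × String × List String)) (remaining_keys : List (String × String)) (curr_comb : List (String × String × String)) (out : List ((List (List (String × String))) × (List (List (String × String))))) : Decidable (Spec_get_term_combinations inp out_ fill_dict remaining_keys curr_comb out) := by unfold Spec_get_term_combinations; infer_instance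

-- ===== CLAIM (what is proved, stated in full; the proofs are below) =====
def Claim_equal_get_term_combinations : Prop := ∀ (inp : List (List (String × String))) (out_ : List (List (String × String))) (fill_dict : List (String × String × List String)) (remaining_keys : List (String × String)) (curr_comb : List (String × String × String)), Dom_get_term_combinations inp out_ fill_dict remaining_keys curr_comb → Pre_get_term_combinations inp out_ fill_dict remaining_keys curr_comb → Spec_get_term_combinations inp out_ fill_dict remaining_keys curr_comb (get_term_combinations inp out_ fill_dict remaining_keys curr_comb)

-- ===== LEMMAS AND PROOFS =====

-- A's per-param dict-building loop equals B's map over the same items (items keys are unique)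
theorem pvSubstA_eq_pvSubstB (curr : PySem.Dict (String × String) String)
    (params : List (List (String × String))) : pvSubstA curr params = pvSubstB curr params := by
  unfold pvSubstA pvSubstB
  refine List.map_congr_left (fun param _ => ?_)
  rw [PySem.Dict.items_foldl_insert_fresh _ _ _ _
        (fun a _ => PySem.Dict.contains_empty _)
        (by simpa [PySem.Dict.keys] using PySem.Dict.nodup_keys_ofList param)]
  simp [PySem.Dict.empty, PySem.Dict.getD_eq_get?_getD, Option.getD]
  intro a b _
  cases curr.get? (a, b) <;> rfl

-- the main induction: B's level-wise loop, applied to a list of partial assignments and followed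
-- by the substitution map, equals collecting A's recursion from each of those assignments
theorem pvLevel_eq (inp out_ : List (List (String × String)))
    (fd : PySem.Dict (String × String) (List String)) :
    ∀ (rem : List (String × String)) (combs : List (PySem.Dict (String × String) String)),
      (pvLevel fd rem combs).map (fun c => (pvSubstB c inp, pvSubstB c out_)) =
      combs.flatMap (fun c => pvGtcA inp out_ fd rem c) := by
  intro rem
  induction rem with
  | nil =>
      intro combs
      induction combs with
      | nil => simp [pvLevel]
      | cons c cs ihc => simpa [pvLevel, pvGtcA, pvSubstA_eq_pvSubstB] using ihc
  | cons k rest ih =>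
      intro combs
      by_cases h : combs.isEmpty
      · rw [List.isEmpty_iff] at h
        simp [pvLevel, h]
      · simp only [pvLevel, if_neg h]
        rw [ih]
        rw [List.flatMap_assoc]
        refine List.flatMap_congr (fun c _ => ?_)
        simp only [pvGtcA]
        rw [PySem.List.foldl_append_eq_flatMap]
        simp [List.flatMap_map]

-- ===== VERDICT (by name: the statement is the Claim_ definition above) =====
theorem get_term_combinations_spec : Claim_equal_get_term_combinations := by
  intro inp out_ fill_dict remaining_keys curr_comb _ _
  unfold Spec_get_term_combinations get_term_combinations get_term_combinations_alt
  rw [pvLevel_eq]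
  simp
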